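-- pv_equiv track=rewrite | github.com/bgoskouie/DataStructuresAlgorithms-TrainingSolutions | chapter2-Data-Structures/02-LinkedList/recursion09_encrypt_code.py | all_combos
-- ===== SOURCE A (Python) =====
-- def all_combos(digits):
--     if len(digits) == 1:
--         return [digits]
--     out = list()
--     prev = all_combos(digits[:-1])
--
--     for item in prev:
--         out.append(item + [digits[-1]])
--         last = item[-1]
--         num = last * 10 + digits[-1]
--         out.append(item[:-1] + [num])
--     return out
-- ===== SOURCE B (Python) =====
-- def all_combos(digits):
--     n = len(digits)
--     if n <= 1:
--         return [digits]
--     g = n - 1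
--     out = []
--     for mask in range(2 ** g):
--         combo = []
--         cur = digits[0]
--         for j, d in enumerate(digits[1:]):
--             if (mask // 2 ** (g - 1 - j)) % 2 == 1:
--                 cur = cur * 10 + d
--             else:
--                 combo.append(cur)
--                 cur = d
--         combo.append(cur)
--         out.append(combo)
--     return out
-- ===== Notes on version B (the rewrite author's own statement) =====
-- stated objective: alternative
-- what changed: Replaces A's recursion on the prefix (which doubles the previous result list per digit) by a direct iterative enumeration: each grouping is built in one left-to-right pass from a bitmask over the gaps between adjacent digits, MSB-first so the output order is identical.
import Mathlib
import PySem

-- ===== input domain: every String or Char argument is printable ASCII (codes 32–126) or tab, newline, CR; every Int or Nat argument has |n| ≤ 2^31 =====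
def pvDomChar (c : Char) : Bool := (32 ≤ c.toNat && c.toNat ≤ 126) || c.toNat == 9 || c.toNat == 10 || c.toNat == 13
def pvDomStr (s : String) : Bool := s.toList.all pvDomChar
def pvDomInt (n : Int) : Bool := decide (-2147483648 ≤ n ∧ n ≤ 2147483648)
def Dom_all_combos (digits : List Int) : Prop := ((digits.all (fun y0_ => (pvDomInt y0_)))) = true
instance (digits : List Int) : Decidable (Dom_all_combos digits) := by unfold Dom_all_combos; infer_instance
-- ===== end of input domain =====

-- B re-derives each grouping directly from a bitmask over the gaps (iterative enumeration)
-- instead of A's recursion on the prefix; equivalence of the RETURN values is proved on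
-- nonempty inputs (A raises RecursionError on []).


-- ===== PORT A =====
def all_combos (digits : List Int) : List (List Int) :=
  if digits.length = 1 then [digits]
  else if h : digits = [] then []  -- Python recurses forever here (RecursionError); excluded by Pre_
  else
    let prev := all_combos (PySem.List.slice digits none (some (-1)))  -- digits[:-1]
    prev.foldl (fun out item =>
      (out ++ [item ++ [(PySem.List.pyGet? digits (-1)).getD 0]]) ++
        [PySem.List.slice item none (some (-1)) ++
          [(PySem.List.pyGet? item (-1)).getD 0 * 10 + (PySem.List.pyGet? digits (-1)).getD 0]]) []
termination_by digits.length
decreasing_by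
  rw [PySem.List.slice_to_neg_one]
  have hl : 0 < digits.length := List.length_pos_iff.mpr h
  simp [List.length_dropLast]; omega

-- ===== PORT B =====
-- loop body of B's inner pass over enumerate(digits[1:]); exponent g-1-j is ≥ 0 for every
-- enumerated index, so .toNat is exact there
def pvStep (g mask : Int) (s : List Int × Int) (jd : Int × Int) : List Int × Int :=
  if PySem.Int.mod (PySem.Int.floordiv mask ((2:Int) ^ (g - 1 - jd.1).toNat)) 2 == 1
  then (s.1, s.2 * 10 + jd.2)
  else (s.1 ++ [s.2], jd.2)

def pvComboFor (g mask d0 : Int) (rest : List Int) : List Int :=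
  let s := (PySem.List.enumerate rest).foldl (pvStep g mask) ([], d0)
  s.1 ++ [s.2]

def all_combos_alt (digits : List Int) : List (List Int) :=
  let n := digits.length
  if n ≤ 1 then [digits]
  else
    let g : Int := (n : Int) - 1   -- g ≥ 1 here, so 2 ** g is 2 ^ g.toNat
    (PySem.List.pyRange 0 ((2:Int) ^ g.toNat) 1).foldl
      (fun out mask =>
        out ++ [pvComboFor g mask ((PySem.List.pyGet? digits 0).getD 0)
                  (PySem.List.slice digits (some 1) none)]) []   -- digits[0], digits[1:]

-- ===== PRECONDITION & SPEC =====
-- Pre_ excludes only the empty list, on which the Python A never returns (RecursionError).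
def Pre_all_combos (digits : List Int) : Prop := digits ≠ []
instance (digits : List Int) : Decidable (Pre_all_combos digits) := by unfold Pre_all_combos; infer_instance
def pvWitness_all_combos : List Int := [1, 2, 3]

def Spec_all_combos (digits : List Int) (out : List (List Int)) : Prop := out = all_combos_alt digits
instance (digits : List Int) (out : List (List Int)) : Decidable (Spec_all_combos digits out) := by unfold Spec_all_combos; infer_instance

-- ===== CLAIM (what is proved, stated in full; the proofs are below) =====
def Claim_equal_all_combos : Prop := ∀ (digits : List Int), Dom_all_combos digits → Pre_all_combos digits → Spec_all_combos digits (all_combos digits)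

-- ===== LEMMAS AND PROOFS =====

-- the per-item transform A applies to each grouping of the prefix
def pvF (d : Int) (item : List Int) : List (List Int) :=
  [item ++ [d], item.dropLast ++ [(PySem.List.pyGet? item (-1)).getD 0 * 10 + d]]

lemma pvA_snoc (xs : List Int) (d : Int) (hxs : xs ≠ []) :
    all_combos (xs ++ [d]) = (all_combos xs).flatMap (pvF d) := by
  have hlen : 0 < xs.length := List.length_pos_iff.mpr hxs
  rw [all_combos.eq_def]
  simp only [List.length_append, List.length_cons, List.length_nil]
  rw [if_neg (by omega), dif_neg (by simp), PySem.List.slice_to_neg_one,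
      List.dropLast_concat, PySem.List.pyGet?_neg_one_append_singleton]
  rw [PySem.List.foldl_congr_mem _ _
        (fun out item => out ++ pvF d item) []
        (fun acc x _ => by simp [pvF, PySem.List.slice_to_neg_one, List.append_assoc]),
      PySem.List.foldl_append_eq_flatMap]
  simp

lemma pvDivShift (m b t : Int) (ht : 0 < t) (hb0 : 0 ≤ b) (hb2 : b < 2) :
    PySem.Int.floordiv (2 * m + b) (2 * t) = PySem.Int.floordiv m t := by
  rw [PySem.Int.floordiv_eq_ediv_of_pos (by omega), PySem.Int.floordiv_eq_ediv_of_pos ht]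
  have hr0 : 0 ≤ m % t := Int.emod_nonneg m (by omega)
  have hrt : m % t < t := Int.emod_lt_of_pos m ht
  have hdecomp : 2 * m + b = (2 * (m % t) + b) + (m / t) * (2 * t) := by
    have h : m = t * (m / t) + m % t := (Int.ediv_add_emod m t).symm
    calc 2 * m + b = 2 * (t * (m / t) + m % t) + b := by rw [← h]
      _ = (2 * (m % t) + b) + (m / t) * (2 * t) := by ring
  rw [hdecomp, Int.add_mul_ediv_right _ _ (by omega : 2 * t ≠ 0),
      Int.ediv_eq_zero_of_lt (by omega) (by omega), zero_add]

lemma pvRangeDouble (k : Nat) :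
    List.range (2 * k) = (List.range k).flatMap (fun m => [2 * m, 2 * m + 1]) := by
  induction k with
  | zero => simp
  | succ n ih =>
    have h : 2 * (n + 1) = (2 * n + 1) + 1 := by omega
    rw [h, List.range_succ, List.range_succ, List.range_succ, ih]
    simp

lemma pvStep_shift (rest : List Int) (m b : Int) (s : List Int × Int)
    (hb0 : 0 ≤ b) (hb2 : b < 2) :
    (PySem.List.enumerate rest).foldl (pvStep ((rest.length : Int) + 1) (2 * m + b)) s
      = (PySem.List.enumerate rest).foldl (pvStep (rest.length : Int) m) s := by
  apply PySem.List.foldl_congr_mem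
  intro acc p hp
  obtain ⟨k, hk, hpk⟩ := (PySem.List.mem_enumerate_iff _ _ _).mp hp
  have hj : p.1 = (k : Int) := by rw [hpk]; simp
  have hexp : ((rest.length : Int) + 1 - 1 - p.1).toNat = ((rest.length : Int) - 1 - p.1).toNat + 1 := by
    omega
  have hpow : (2:Int) ^ ((rest.length : Int) + 1 - 1 - p.1).toNat
      = 2 * (2:Int) ^ ((rest.length : Int) - 1 - p.1).toNat := by
    rw [hexp, pow_succ]; ring
  unfold pvStep
  rw [hpow, pvDivShift m b _ (by positivity) hb0 hb2]

lemma pvStep_last (m b d0 d : Int) (rest : List Int) (s : List Int × Int)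
    (hb : b = 0 ∨ b = 1) :
    pvStep ((rest.length : Int) + 1) (2 * m + b) s ((0 : Int) + (rest.length : Int), d)
      = if b = 1 then (s.1, s.2 * 10 + d) else (s.1 ++ [s.2], d) := by
  unfold pvStep
  have hexp : ((rest.length : Int) + 1 - 1 - ((0 : Int) + (rest.length : Int))).toNat = 0 := by omega
  rw [hexp]
  have h1 : PySem.Int.floordiv (2 * m + b) ((2:Int) ^ (0:Nat)) = 2 * m + b := by
    rw [pow_zero, PySem.Int.floordiv_eq_ediv_of_pos (by omega), Int.ediv_one]
  rw [h1, PySem.Int.mod_eq_emod_of_pos (by omega)]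
  rcases hb with hb | hb <;> subst hb
  · have h2 : (2 * m + 0) % 2 = 0 := by omega
    simp [h2]

  · have h2 : (2 * m + 1) % 2 = 1 := by omega
    simp

lemma pvEnum_snoc (rest : List Int) (d : Int) :
    PySem.List.enumerate (rest ++ [d]) 0
      = PySem.List.enumerate rest 0 ++ [((0 : Int) + (rest.length : Int), d)] := by
  rw [PySem.List.enumerate_append, PySem.List.enumerate_cons, PySem.List.enumerate_nil]

lemma pvComboFor_snoc0 (d0 d m : Int) (rest : List Int) :
    pvComboFor ((rest.length : Int) + 1) (2 * m) d0 (rest ++ [d])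
      = pvComboFor (rest.length : Int) m d0 rest ++ [d] := by
  unfold pvComboFor
  rw [show PySem.List.enumerate (rest ++ [d]) = PySem.List.enumerate (rest ++ [d]) 0 from rfl,
      pvEnum_snoc, List.foldl_append,
      show (2 * m : Int) = 2 * m + 0 by ring,
      pvStep_shift rest m 0 _ (by omega) (by omega)]
  simp only [List.foldl_cons, List.foldl_nil]
  rw [pvStep_last m 0 d0 d rest _ (Or.inl rfl)]
  simp

lemma pvComboFor_snoc1 (d0 d m : Int) (rest : List Int) :
    pvComboFor ((rest.length : Int) + 1) (2 * m + 1) d0 (rest ++ [d])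
      = (pvComboFor (rest.length : Int) m d0 rest).dropLast
          ++ [(PySem.List.pyGet? (pvComboFor (rest.length : Int) m d0 rest) (-1)).getD 0 * 10 + d] := by
  unfold pvComboFor
  rw [show PySem.List.enumerate (rest ++ [d]) = PySem.List.enumerate (rest ++ [d]) 0 from rfl,
      pvEnum_snoc, List.foldl_append,
      pvStep_shift rest m 1 _ (by omega) (by omega)]
  simp only [List.foldl_cons, List.foldl_nil]
  rw [pvStep_last m 1 d0 d rest _ (Or.inr rfl)]
  simp [PySem.List.pyGet?_neg_one_append_singleton]

lemma pvB_closed (d0 : Int) (rest : List Int) :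
    all_combos_alt (d0 :: rest)
      = (PySem.List.pyRange 0 ((2:Int) ^ rest.length) 1).map
          (fun m => pvComboFor (rest.length : Int) m d0 rest) := by
  unfold all_combos_alt
  rcases rest with _ | ⟨x, rest'⟩
  · simp [pvComboFor]
  · simp only [List.length_cons]
    rw [if_neg (by omega)]
    have hcast : ((rest'.length + 1 + 1 : Nat) : Int) - 1 = ((rest'.length + 1 : Nat) : Int) := by
      push_cast; ring
    rw [hcast]
    have htoNat : (((rest'.length + 1 : Nat) : Int)).toNat = rest'.length + 1 := by omega
    rw [htoNat, PySem.List.foldl_append_singleton_eq_map]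
    simp [PySem.List.slice_from_one, PySem.List.pyGet?_zero_cons]

lemma pvB_snoc (xs : List Int) (d : Int) (hxs : xs ≠ []) :
    all_combos_alt (xs ++ [d]) = (all_combos_alt xs).flatMap (pvF d) := by
  obtain ⟨d0, rest, rfl⟩ := List.exists_cons_of_ne_nil hxs
  rw [List.cons_append, pvB_closed d0 (rest ++ [d]), pvB_closed d0 rest]
  have hlen : (rest ++ [d]).length = rest.length + 1 := by simp
  rw [hlen]
  have hcastN : ((2:Int) ^ (rest.length + 1)) = ((2 ^ (rest.length + 1) : Nat) : Int) := by
    push_cast; ring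
  have hcastN' : ((2:Int) ^ rest.length) = ((2 ^ rest.length : Nat) : Int) := by
    push_cast; ring
  rw [hcastN, hcastN', PySem.List.pyRange_zero_nat, PySem.List.pyRange_zero_nat,
      show (2 : Nat) ^ (rest.length + 1) = 2 * 2 ^ rest.length by ring,
      pvRangeDouble]
  rw [List.map_map, List.map_map, List.flatMap_map]
  rw [List.map_flatMap]
  apply List.flatMap_congr
  intro k _
  simp only [Function.comp_apply, List.map_cons, List.map_nil]
  have hc1 : ((2 * k : Nat) : Int) = 2 * (k : Int) := by push_cast; ring
  have hc2 : ((2 * k + 1 : Nat) : Int) = 2 * (k : Int) + 1 := by push_cast; ring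
  have hc3 : ((rest.length + 1 : Nat) : Int) = (rest.length : Int) + 1 := by push_cast; ring
  rw [hc1, hc2, hc3, pvComboFor_snoc0, pvComboFor_snoc1]
  simp [pvF]

lemma pvMain (digits : List Int) (h : digits ≠ []) :
    all_combos digits = all_combos_alt digits := by
  induction digits using List.reverseRecOn with
  | nil => exact absurd rfl h
  | append_singleton xs d ih =>
    by_cases hxs : xs = []
    · subst hxs
      simp [all_combos, all_combos_alt]
    · rw [pvA_snoc xs d hxs, pvB_snoc xs d hxs, ih hxs]

-- ===== VERDICT (by name: the statement is the Claim_ definition above) =====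
theorem all_combos_spec : Claim_equal_all_combos := by
  intro digits _ hpre
  unfold Spec_all_combos
  exact pvMain digits hpre
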